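-- pv_equiv track=rewrite | github.com/Xpiral397/ms-novel-code | ms-novel-code/python-novel-code/host_tasks/task_colab-2/tests.py | first_k_primes_ending_in_7
-- ===== SOURCE A (Python) =====
-- def first_k_primes_ending_in_7(k: int) -> list[int]:
--     limit = 10000
--     sieve = [True] * (limit + 1)
--     sieve[0:2] = [False, False]
--     for i in range(2, int(limit**0.5) + 1):
--         if sieve[i]:
--             for j in range(i*i, limit + 1, i):
--                 sieve[j] = False
--     return [i for i in range(7, limit + 1) if sieve[i] and i % 10 == 7][:k]
-- ===== SOURCE B (Python) =====
-- def first_k_primes_ending_in_7(k: int) -> list[int]: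
--     def is_prime(n: int) -> bool:
--         # n is odd and >= 7 here, so trial division by odd d >= 3 suffices
--         d = 3
--         while d * d <= n:
--             if n % d == 0:
--                 return False
--             d += 2
--         return True
--
--     primes = [n for n in range(7, 10001, 10) if is_prime(n)]
--     return primes[:k]
-- ===== Notes on version B (the rewrite author's own statement) =====
-- stated objective: alternative
-- what changed: Replaces the full sieve of Eratosthenes over the fixed range by direct trial division (odd divisors only) applied just to the candidates whose last digit is seven, then slices the prefix of length k.
import Mathlib
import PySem

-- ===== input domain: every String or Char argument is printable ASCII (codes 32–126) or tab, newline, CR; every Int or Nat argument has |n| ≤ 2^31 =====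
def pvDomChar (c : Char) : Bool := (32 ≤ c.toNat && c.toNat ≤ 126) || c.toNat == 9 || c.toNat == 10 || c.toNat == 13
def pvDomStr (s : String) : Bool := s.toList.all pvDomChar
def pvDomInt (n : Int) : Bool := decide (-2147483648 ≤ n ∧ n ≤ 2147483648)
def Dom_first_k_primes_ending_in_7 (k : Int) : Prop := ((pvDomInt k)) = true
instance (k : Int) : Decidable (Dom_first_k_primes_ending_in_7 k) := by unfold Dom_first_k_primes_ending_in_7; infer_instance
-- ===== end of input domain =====

-- B replaces A's sieve of Eratosthenes over [0,10000] by trial division applied only to the candidates ending in 7 (same values, a different algorithm of similar cost).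


-- ===== PORT A =====
-- sieve = [True]*(limit+1); sieve[0:2] = [False, False]   (limit = 10000)
def pvSieve0 : List Bool :=
  PySem.List.pySetD (PySem.List.pySetD (List.replicate 10001 true) 0 false) 1 false

-- the inner loop: for j in range(i*i, limit+1, i): sieve[j] = False
def pvMark (sv : List Bool) (i : Int) : List Bool :=
  (PySem.List.pyRange (i*i) 10001 i).foldl (fun s j => PySem.List.pySetD s j false) sv

-- the outer loop up to I: for i in range(2, I): if sieve[i]: <inner loop>   (int(10000**0.5)+1 = 101)
def pvOuter (I : Int) : List Bool :=
  (PySem.List.pyRange 2 I).foldl (fun s i => if PySem.List.pyGetD s i true then pvMark s i else s) pvSieve0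

def first_k_primes_ending_in_7 (k : Int) : List Int :=
  PySem.List.slice
    ((PySem.List.pyRange 7 10001).filter
      (fun i => PySem.List.pyGetD (pvOuter 101) i true && decide (PySem.Int.mod i 10 = 7)))
    none (some k)

-- ===== PORT B =====
-- the while loop of is_prime: while d*d <= n: if n % d == 0: return False; d += 2  (fuel bounds the iteration count)
def pvIsPrimeAux (n : Int) : Nat → Int → Bool
  | 0, _ => true
  | fuel+1, d =>
      if d * d ≤ n then
        (if PySem.Int.mod n d = 0 then false else pvIsPrimeAux n fuel (d + 2))
      else true

def pvIsPrime (n : Int) : Bool := pvIsPrimeAux n n.toNat 3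

def first_k_primes_ending_in_7_alt (k : Int) : List Int :=
  PySem.List.slice ((PySem.List.pyRange 7 10001 10).filter (fun n => pvIsPrime n)) none (some k)

-- ===== PRECONDITION & SPEC =====
def Spec_first_k_primes_ending_in_7 (k : Int) (out : List Int) : Prop := out = first_k_primes_ending_in_7_alt k
instance (k : Int) (out : List Int) : Decidable (Spec_first_k_primes_ending_in_7 k out) := by unfold Spec_first_k_primes_ending_in_7; infer_instance

-- ===== CLAIM (what is proved, stated in full; the proofs are below) =====
def Claim_equal_first_k_primes_ending_in_7 : Prop := ∀ (k : Int), Dom_first_k_primes_ending_in_7 k → Spec_first_k_primes_ending_in_7 k (first_k_primes_ending_in_7 k)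

-- ===== LEMMAS AND PROOFS =====

-- `pvMarked I j` : index j has been crossed out by some outer iteration i < I
def pvMarked (I j : Int) : Prop :=
  ∃ p : Int, 2 ≤ p ∧ p < I ∧ Nat.Prime p.toNat ∧ p ∣ j ∧ p * p ≤ j

-- composite j ≥ 2 has a prime divisor p with p*p ≤ j
theorem pv_minFac_wit (j : Int) (h2 : 2 ≤ j) (hnp : ¬ Nat.Prime j.toNat) :
    ∃ p : Int, 2 ≤ p ∧ Nat.Prime p.toNat ∧ p ∣ j ∧ p * p ≤ j := by
  set m := j.toNat with hm
  have hm2 : 2 ≤ m := by omega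
  have hp : Nat.Prime m.minFac := Nat.minFac_prime (by omega)
  have hdvd : m.minFac ∣ m := Nat.minFac_dvd m
  have hsq : m.minFac ^ 2 ≤ m := Nat.minFac_sq_le_self (by omega) hnp
  refine ⟨(m.minFac : Int), by exact_mod_cast hp.two_le, by simpa using hp, ?_, ?_⟩
  · have : (m.minFac : Int) ∣ (m : Int) := Int.natCast_dvd_natCast.mpr hdvd
    simpa [hm, Int.toNat_of_nonneg (by omega : (0:Int) ≤ j)] using this
  · have : ((m.minFac * m.minFac : Nat) : Int) ≤ (m : Int) := by
      exact_mod_cast (by nlinarith [hsq] : m.minFac * m.minFac ≤ m)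
    omega

theorem pvMarked_iff (I j : Int) (h2 : 2 ≤ j)
    (hub : ∀ p : Int, 2 ≤ p → p * p ≤ j → p < I) :
    pvMarked I j ↔ ¬ Nat.Prime j.toNat := by
  constructor
  · rintro ⟨p, hp2, hpI, hpprime, hpdvd, hpsq⟩ hprime
    have hplt : p < j := by nlinarith
    have hdvdN : p.toNat ∣ j.toNat := by
      have : (p.toNat : Int) ∣ (j.toNat : Int) := by
        rwa [Int.toNat_of_nonneg (by omega), Int.toNat_of_nonneg (by omega)]
      exact_mod_cast this
    rcases hprime.eq_one_or_self_of_dvd _ hdvdN with h | h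
    · omega
    · omega
  · intro hnp
    obtain ⟨p, hp2, hpp, hpd, hps⟩ := pv_minFac_wit j h2 hnp
    exact ⟨p, hp2, hub p hp2 hps, hpp, hpd, hps⟩

theorem pv_prime_of_no_small (n d : Int) (h2 : 2 ≤ n) (hd3 : 3 ≤ d) (hd : n < d * d)
    (hinv : ∀ e : Int, 2 ≤ e → e < d → ¬ e ∣ n) : Nat.Prime n.toNat := by
  by_contra hnp
  obtain ⟨p, hp2, _, hpd, hps⟩ := pv_minFac_wit n h2 hnp
  refine hinv p hp2 ?_ hpd
  by_contra hlt
  have : d * d ≤ p * p := mul_le_mul (by omega) (by omega) (by omega) (by omega)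
  omega

theorem pv_not_prime_of_div (n d : Int) (hd3 : 3 ≤ d) (hdd : d * d ≤ n) (hdvd : d ∣ n) :
    ¬ Nat.Prime n.toNat := by
  intro hp
  have hdn : d < n := by nlinarith
  have : d.toNat ∣ n.toNat := by
    have : (d.toNat : Int) ∣ (n.toNat : Int) := by
      rwa [Int.toNat_of_nonneg (by omega), Int.toNat_of_nonneg (by omega)]
    exact_mod_cast this
  rcases hp.eq_one_or_self_of_dvd _ this with h | h <;> omega

theorem pv_foldl_set_length (L : List Int) (sv : List Bool) :
    (L.foldl (fun s j => PySem.List.pySetD s j false) sv).length = sv.length := by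
  induction L generalizing sv with
  | nil => rfl
  | cons x L ih => simp [List.foldl_cons, ih, PySem.List.length_pySetD]

theorem pv_foldl_set_get (L : List Int) (sv : List Bool) (j : Int)
    (hj0 : 0 ≤ j) (hj : j < sv.length) (hL : ∀ x ∈ L, 0 ≤ x) :
    PySem.List.pyGetD (L.foldl (fun s j => PySem.List.pySetD s j false) sv) j true
      = if j ∈ L then false else PySem.List.pyGetD sv j true := by
  induction L generalizing sv with
  | nil => simp
  | cons x L ih =>
    have hx : 0 ≤ x := hL x (by simp)
    have hlen : (PySem.List.pySetD sv x false).length = sv.length := PySem.List.length_pySetD _ _ _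
    rw [List.foldl_cons, ih _ (by omega) (fun y hy => hL y (by simp [hy]))]
    rw [PySem.List.pySetD_of_nonneg _ _ hx]
    by_cases hmem : j ∈ L
    · simp [hmem]
    · by_cases hjx : j = x
      · subst hjx
        rw [PySem.List.pyGetD_eq_getElem _ _ hj0 (by simpa using hj)]
        simp [hmem]
      · simp only [List.mem_cons, hmem, or_false, hjx]
        rw [PySem.List.pyGetD_eq_getElem _ _ hj0 (by simpa using hj),
            PySem.List.pyGetD_eq_getElem _ _ hj0 (by simpa using hj)]
        rw [List.getElem_set]
        have : x.toNat ≠ j.toNat := by omega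
        simp [this]

theorem pvSieve0_length : pvSieve0.length = 10001 := by
  unfold pvSieve0
  rw [PySem.List.length_pySetD, PySem.List.length_pySetD, List.length_replicate]

theorem pvSieve0_get (j : Int) (h0 : 0 ≤ j) (h : j < 10001) :
    PySem.List.pyGetD pvSieve0 j true = decide (2 ≤ j) := by
  unfold pvSieve0
  rw [PySem.List.pySetD_of_nonneg _ _ (by omega : (0:Int) ≤ 0),
      PySem.List.pySetD_of_nonneg _ _ (by omega : (0:Int) ≤ 1)]
  have hlen : (((List.replicate 10001 true).set (0:Int).toNat false).set (1:Int).toNat false).length = 10001 := by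
    rw [List.length_set, List.length_set, List.length_replicate]
  rw [PySem.List.pyGetD_eq_getElem _ _ h0 (by rw [hlen]; exact_mod_cast h)]
  rw [List.getElem_set, List.getElem_set, List.getElem_replicate]
  by_cases h1 : (1:Int).toNat = j.toNat
  · have : ¬ (2 ≤ j) := by omega
    simp [h1, this]
  · by_cases h2 : (0:Int).toNat = j.toNat
    · have : ¬ (2 ≤ j) := by omega
      simp [h2, this]
    · have : (2 ≤ j) := by omega
      simp [this]
      omega

theorem pvMark_length (sv : List Bool) (i : Int) : (pvMark sv i).length = sv.length :=
  pv_foldl_set_length _ _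

theorem pvMark_get (sv : List Bool) (i j : Int) (hi : 2 ≤ i)
    (hj0 : 0 ≤ j) (hj : j < sv.length) :
    PySem.List.pyGetD (pvMark sv i) j true
      = if i ∣ j ∧ i * i ≤ j ∧ j < 10001 then false else PySem.List.pyGetD sv j true := by
  unfold pvMark
  rw [pv_foldl_set_get _ _ _ hj0 hj
      (by intro x hx
          rcases (PySem.List.mem_pyRange_iff_of_pos (by omega) x).mp hx with ⟨h1, _, _⟩
          nlinarith)]
  congr 1
  rw [PySem.List.mem_pyRange_iff_of_pos (by omega)]
  apply propext
  constructor
  · rintro ⟨h1, h2, h3⟩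
    exact ⟨by simpa using dvd_add h3 (Dvd.intro i rfl), h1, h2⟩
  · rintro ⟨h1, h2, h3⟩
    exact ⟨h2, h3, dvd_sub h1 (Dvd.intro i rfl)⟩

theorem pvMarked_succ (I j : Int) (hI2 : 2 ≤ I) :
    pvMarked (I + 1) j ↔ pvMarked I j ∨ (Nat.Prime I.toNat ∧ I ∣ j ∧ I * I ≤ j) := by
  constructor
  · rintro ⟨p, hp2, hpI, hpp, hpd, hps⟩
    rcases (by omega : p < I ∨ p = I) with h | h
    · exact Or.inl ⟨p, hp2, h, hpp, hpd, hps⟩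
    · subst h; exact Or.inr ⟨hpp, hpd, hps⟩
  · rintro (⟨p, hp2, hpI, hpp, hpd, hps⟩ | ⟨hpp, hpd, hps⟩)
    · exact ⟨p, hp2, by omega, hpp, hpd, hps⟩
    · exact ⟨I, hI2, by omega, hpp, hpd, hps⟩

theorem pvOuter_two : pvOuter 2 = pvSieve0 := by
  unfold pvOuter
  rw [PySem.List.pyRange_one_eq_nil le_rfl]
  rw [List.foldl_nil]

theorem pvOuter_succ (I : Int) (hI : 2 ≤ I) :
    pvOuter (I + 1)
      = if PySem.List.pyGetD (pvOuter I) I true then pvMark (pvOuter I) I else pvOuter I := by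
  unfold pvOuter
  rw [PySem.List.pyRange_one_succ_right hI, List.foldl_append]
  rw [List.foldl_cons, List.foldl_nil]

-- the sieve invariant
theorem pvOuter_inv (t : Nat) (ht : t ≤ 99) :
    (pvOuter (2 + (t : Int))).length = 10001 ∧
    ∀ j : Int, 0 ≤ j → j < 10001 →
      (PySem.List.pyGetD (pvOuter (2 + (t : Int))) j true = true ↔
        (2 ≤ j ∧ ¬ pvMarked (2 + (t : Int)) j)) := by
  induction t with
  | zero =>
    have h0 : (2 + ((0:Nat) : Int)) = 2 := by norm_num
    rw [h0, pvOuter_two]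
    refine ⟨pvSieve0_length, ?_⟩
    intro j hj0 hj
    rw [pvSieve0_get j hj0 hj]
    constructor
    · intro h
      refine ⟨by simpa using h, ?_⟩
      rintro ⟨p, hp2, hpI, _⟩
      omega
    · rintro ⟨h2, _⟩
      simpa using h2
  | succ t ih =>
    obtain ⟨ihlen, ihget⟩ := ih (by omega)
    set I : Int := 2 + (t : Int) with hIdef
    have hcast : 2 + ((t + 1 : Nat) : Int) = I + 1 := by push_cast; ring
    have hI2 : 2 ≤ I := by omega
    have hIlt : I < 10001 := by omega
    rw [hcast, pvOuter_succ I hI2]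
    have hcond := ihget I (by omega) hIlt
    have hMI : ¬ pvMarked I I ↔ Nat.Prime I.toNat := by
      rw [pvMarked_iff I I hI2 (fun p hp2 hps => by nlinarith), not_not]
    by_cases hc : PySem.List.pyGetD (pvOuter I) I true = true
    · rw [if_pos hc]
      have hIprime : Nat.Prime I.toNat := hMI.mp (hcond.mp hc).2
      refine ⟨by rw [pvMark_length]; exact ihlen, ?_⟩
      intro j hj0 hj
      rw [pvMark_get _ I j hI2 hj0 (by rw [ihlen]; exact_mod_cast hj)]
      by_cases hd : I ∣ j ∧ I * I ≤ j ∧ j < 10001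
      · rw [if_pos hd]
        simp only [Bool.false_eq_true, false_iff]
        rintro ⟨h2j, hnm⟩
        exact hnm ((pvMarked_succ I j hI2).mpr (Or.inr ⟨hIprime, hd.1, hd.2.1⟩))
      · rw [if_neg hd]
        have hstep : pvMarked (I + 1) j ↔ pvMarked I j := by
          rw [pvMarked_succ I j hI2]
          constructor
          · rintro (h | ⟨_, hd1, hd2⟩)
            · exact h
            · exact absurd ⟨hd1, hd2, by omega⟩ hd
          · exact Or.inl
        rw [hstep]
        exact ihget j hj0 hj
    · rw [if_neg hc]
      have hmarked : pvMarked I I := by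
        by_contra hnm
        exact hc (hcond.mpr ⟨hI2, hnm⟩)
      have hnp : ¬ Nat.Prime I.toNat := fun hp => (hMI.mpr hp) hmarked
      refine ⟨ihlen, ?_⟩
      intro j hj0 hj
      have hstep : pvMarked (I + 1) j ↔ pvMarked I j := by
        rw [pvMarked_succ I j hI2]
        constructor
        · rintro (h | ⟨hp, _, _⟩)
          · exact h
          · exact absurd hp hnp
        · exact Or.inl
      rw [hstep]
      exact ihget j hj0 hj

theorem pvSieve_prime (j : Int) (h2 : 2 ≤ j) (h : j < 10001) :
    PySem.List.pyGetD (pvOuter 101) j true = decide (Nat.Prime j.toNat) := by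
  have h99 : (2 + ((99:Nat) : Int)) = 101 := by norm_num
  have hiff := (pvOuter_inv 99 le_rfl).2 j (by omega) h
  rw [h99] at hiff
  have hM : ¬ pvMarked 101 j ↔ Nat.Prime j.toNat := by
    rw [pvMarked_iff 101 j h2 (fun p hp2 hps => by nlinarith), not_not]
  by_cases hp : Nat.Prime j.toNat
  · simp only [hp, decide_true]
    exact hiff.mpr ⟨h2, hM.mpr hp⟩
  · simp only [hp, decide_false]
    cases hB : PySem.List.pyGetD (pvOuter 101) j true
    · rfl
    · exact absurd (hM.mp (hiff.mp hB).2) hp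

-- trial division is primality for odd n
theorem pvIsPrimeAux_eq (n : Int) (h2 : 2 ≤ n) (hodd : ¬ (2 ∣ n)) :
    ∀ (fuel : Nat) (d : Int), 3 ≤ d → ¬ (2 ∣ d) →
      (∀ e : Int, 2 ≤ e → e < d → ¬ e ∣ n) → n < (d + 2 * fuel) * (d + 2 * fuel) →
      (pvIsPrimeAux n fuel d = true ↔ Nat.Prime n.toNat) := by
  intro fuel
  induction fuel with
  | zero =>
    intro d hd3 _ hinv hbound
    simp only [pvIsPrimeAux, true_iff]
    exact pv_prime_of_no_small n d h2 hd3 (by simpa using hbound) hinv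
  | succ fuel ih =>
    intro d hd3 hdodd hinv hbound
    simp only [pvIsPrimeAux]
    by_cases hle : d * d ≤ n
    · rw [if_pos hle]
      by_cases hz : PySem.Int.mod n d = 0
      · rw [if_pos hz]
        simp only [Bool.false_eq_true, false_iff]
        exact pv_not_prime_of_div n d hd3 hle ((PySem.Int.mod_eq_zero_iff_dvd n d).mp hz)
      · rw [if_neg hz]
        apply ih (d + 2) (by omega) (by omega)
        · intro e he2 helt hedvd
          rcases (by omega : e < d ∨ e = d ∨ e = d + 1) with h | h | h
          · exact hinv e he2 h hedvd
          · exact hz ((PySem.Int.mod_eq_zero_iff_dvd n d).mpr (h ▸ hedvd))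
          · have h2e : (2:Int) ∣ e := by omega
            exact hodd (dvd_trans h2e hedvd)
        · push_cast at hbound ⊢
          nlinarith
    · rw [if_neg hle]
      simp only [true_iff]
      exact pv_prime_of_no_small n d h2 hd3 (by omega) hinv

theorem pvIsPrime_eq (n : Int) (h7 : 7 ≤ n) (hm : n % 10 = 7) :
    pvIsPrime n = decide (Nat.Prime n.toNat) := by
  have hodd : ¬ (2 ∣ n) := by omega
  have key := pvIsPrimeAux_eq n (by omega) hodd n.toNat 3 (by omega) (by omega)
    (by intro e he2 helt hedvd
        have : e = 2 := by omega
        exact hodd (this ▸ hedvd))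
    (by nlinarith [Int.toNat_of_nonneg (by omega : (0:Int) ≤ n)])
  unfold pvIsPrime
  by_cases hp : Nat.Prime n.toNat
  · simp [hp, key.mpr hp]
  · simp only [hp, decide_false]
    cases hB : pvIsPrimeAux n n.toNat 3
    · rfl
    · exact absurd (key.mp hB) hp

-- filtering the unit-step range by `i % 10 == 7` is the step-10 range
-- (both lists are strictly increasing with the same membership)
theorem pv_range_mod7 :
    (PySem.List.pyRange 7 10001).filter (fun i => decide (PySem.Int.mod i 10 = 7))
      = PySem.List.pyRange 7 10001 10 := by
  have hpl : ((PySem.List.pyRange 7 10001).filter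
      (fun i => decide (PySem.Int.mod i 10 = 7))).Pairwise (· < ·) :=
    List.Pairwise.filter _ (PySem.List.pairwise_lt_pyRange_one 7 10001)
  have hpr : (PySem.List.pyRange 7 10001 10).Pairwise (· < ·) := by
    rw [PySem.List.pyRange_of_pos _ _ (by omega : (0:Int) < 10)]
    exact List.Pairwise.map _ (fun a b h => by omega) List.pairwise_lt_range
  have hmem : ∀ x : Int,
      (x ∈ (PySem.List.pyRange 7 10001).filter (fun i => decide (PySem.Int.mod i 10 = 7)))
        ↔ x ∈ PySem.List.pyRange 7 10001 10 := by
    intro x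
    rw [List.mem_filter, PySem.List.mem_pyRange_iff_of_pos (by omega : (0:Int) < 10),
        PySem.List.mem_pyRange_one, decide_eq_true_iff,
        PySem.Int.mod_eq_emod_of_pos (by omega : (0:Int) < 10)]
    omega
  exact List.Perm.eq_of_pairwise (fun a b _ _ h1 h2 => by omega) hpl hpr
    ((List.perm_ext_iff_of_nodup hpl.nodup hpr.nodup).mpr hmem)

theorem pv_lists_eq :
    (PySem.List.pyRange 7 10001).filter
        (fun i => PySem.List.pyGetD (pvOuter 101) i true && decide (PySem.Int.mod i 10 = 7))
      = (PySem.List.pyRange 7 10001 10).filter (fun n => pvIsPrime n) := by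
  rw [List.filter_congr (fun x hx => ?_), ← @List.filter_filter _
      (fun i => decide (Nat.Prime i.toNat)) (fun i => decide (PySem.Int.mod i 10 = 7)),
      pv_range_mod7, List.filter_congr (fun x hx => ?_)]
  · -- decide (Nat.Prime x.toNat) = pvIsPrime x   on the step-10 range
    obtain ⟨h1, h2, h3⟩ := (PySem.List.mem_pyRange_iff_of_pos (by omega : (0:Int) < 10) x).mp hx
    have hm : x % 10 = 7 := by omega
    exact (pvIsPrime_eq x (by omega) hm).symm
  · -- the sieve entry at x is primality of x
    obtain ⟨h1, h2⟩ := PySem.List.mem_pyRange_one.mp hx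
    rw [pvSieve_prime x (by omega) (by omega)]

-- ===== VERDICT (by name: the statement is the Claim_ definition above) =====
theorem first_k_primes_ending_in_7_spec : Claim_equal_first_k_primes_ending_in_7 := by
  intro k _
  unfold Spec_first_k_primes_ending_in_7 first_k_primes_ending_in_7 first_k_primes_ending_in_7_alt
  rw [pv_lists_eq]
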